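-- pv_equiv track=rewrite | github.com/wyk18703232953/myResearch | codeComplex/data copy/filteredData/python/quadratic/python_quadratic_0229.py | core_algorithm
-- ===== SOURCE A (Python) =====
-- def core_algorithm(n, s, ce):
--     best = 10 ** 9
--     for j in range(1, n - 1):
--         a = ce[j]
--         b = 10 ** 9
--         c = 10 ** 9
--         for i in range(j - 1, -1, -1):
--             if s[i] < s[j]:
--                 b = min(b, ce[i])
--         for k in range(j + 1, n):
--             if s[k] > s[j]:
--                 c = min(c, ce[k])
--         best = min(best, a + b + c)
--
--     if best >= 10 ** 9:
--         return -1
--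
--     else:
--         return best
-- ===== SOURCE B (Python) =====
-- def core_algorithm(n, s, ce):
--     INF = 10 ** 9
--     if n < 3:
--         return -1
--     L = [INF] * n
--     R = [INF] * n
--     for i in range(n):
--         si = s[i]
--         ci = ce[i]
--         for k in range(i + 1, n):
--             if si < s[k]:
--                 if ci < L[k]:
--                     L[k] = ci
--                 if ce[k] < R[i]:
--                     R[i] = ce[k]
--     best = INF
--     for j in range(1, n - 1):
--         t = ce[j] + L[j] + R[j]
--         if t < best:
--             best = t
--     return -1 if best >= INF else best
-- ===== Notes on version B (the rewrite author's own statement) =====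
-- stated objective: alternative
-- what changed: B replaces A's per-centre leftward and rightward rescans by a single pass over ordered index pairs (i,k) that fills a left-minimum array L and a right-minimum array R at once, followed by one combining loop over the centres; B also returns -1 immediately when n < 3.
import Mathlib
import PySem

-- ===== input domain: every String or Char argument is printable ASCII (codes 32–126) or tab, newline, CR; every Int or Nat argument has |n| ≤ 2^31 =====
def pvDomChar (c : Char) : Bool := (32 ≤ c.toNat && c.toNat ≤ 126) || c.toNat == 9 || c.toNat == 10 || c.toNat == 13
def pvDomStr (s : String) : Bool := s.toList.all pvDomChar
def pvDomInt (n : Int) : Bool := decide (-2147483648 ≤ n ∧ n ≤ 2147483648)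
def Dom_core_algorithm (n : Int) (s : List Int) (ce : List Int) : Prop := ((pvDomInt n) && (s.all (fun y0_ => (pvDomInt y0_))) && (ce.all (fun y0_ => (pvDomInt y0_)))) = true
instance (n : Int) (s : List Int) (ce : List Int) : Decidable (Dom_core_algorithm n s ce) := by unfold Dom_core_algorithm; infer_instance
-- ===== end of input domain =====

-- B replaces A's per-centre left/right rescans by one pass over ordered index pairs that fills
-- a left-minimum and a right-minimum array at once, then one combining loop over the centres.

-- ===== PORT A =====
def core_algorithm (n : Int) (s : List Int) (ce : List Int) : Int :=
  let best := (PySem.List.pyRange 1 (n - 1) 1).foldl (fun best j =>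
    let a := PySem.List.pyGetD ce j 0
    let b := (PySem.List.pyRange (j - 1) (-1) (-1)).foldl (fun b i =>
        if PySem.List.pyGetD s i 0 < PySem.List.pyGetD s j 0 then
          min b (PySem.List.pyGetD ce i 0) else b) (10 ^ 9)
    let c := (PySem.List.pyRange (j + 1) n 1).foldl (fun c k =>
        if PySem.List.pyGetD s j 0 < PySem.List.pyGetD s k 0 then
          min c (PySem.List.pyGetD ce k 0) else c) (10 ^ 9)
    min best (a + b + c)) (10 ^ 9)
  if best ≥ 10 ^ 9 then -1 else best

-- ===== PORT B =====
-- inner body of B's pair loop: centre pair (i, k), i < k, updates L[k] and R[i]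
def altUpd (s ce : List Int) (si ci i : Int) (LR : List Int × List Int) (k : Int) :
    List Int × List Int :=
  if si < PySem.List.pyGetD s k 0 then
    let L := if ci < PySem.List.pyGetD LR.1 k 0 then PySem.List.pySetD LR.1 k ci else LR.1
    let R := if PySem.List.pyGetD ce k 0 < PySem.List.pyGetD LR.2 i 0 then
               PySem.List.pySetD LR.2 i (PySem.List.pyGetD ce k 0) else LR.2
    (L, R)
  else LR

-- one outer iteration of B's pair loop (fixed i, all k in (i, n))
def altStep (s ce : List Int) (n : Int) (LR : List Int × List Int) (i : Int) :
    List Int × List Int :=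
  let si := PySem.List.pyGetD s i 0
  let ci := PySem.List.pyGetD ce i 0
  (PySem.List.pyRange (i + 1) n 1).foldl (altUpd s ce si ci i) LR

def core_algorithm_alt (n : Int) (s : List Int) (ce : List Int) : Int :=
  if n < 3 then -1
  else
    let LR := (PySem.List.pyRange 0 n 1).foldl (altStep s ce n)
      (List.replicate n.toNat (10 ^ 9), List.replicate n.toNat (10 ^ 9))
    let best := (PySem.List.pyRange 1 (n - 1) 1).foldl (fun best j =>
        let t := PySem.List.pyGetD ce j 0 + PySem.List.pyGetD LR.1 j 0 +
                 PySem.List.pyGetD LR.2 j 0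
        if t < best then t else best) (10 ^ 9)
    if best ≥ 10 ^ 9 then -1 else best

-- ===== PRECONDITION & SPEC =====
-- Pre_ excludes exactly the inputs where Python A raises IndexError: n ≥ 3 with s or ce shorter than n.
def Pre_core_algorithm (n : Int) (s : List Int) (ce : List Int) : Prop :=
  3 ≤ n → (n ≤ (s.length : Int) ∧ n ≤ (ce.length : Int))
instance (n : Int) (s : List Int) (ce : List Int) : Decidable (Pre_core_algorithm n s ce) := by
  unfold Pre_core_algorithm; infer_instance
def pvWitness_core_algorithm : Int × List Int × List Int := (3, [1, 2, 3], [4, 5, 6])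

def Spec_core_algorithm (n : Int) (s : List Int) (ce : List Int) (out : Int) : Prop :=
  out = core_algorithm_alt n s ce
instance (n : Int) (s : List Int) (ce : List Int) (out : Int) :
    Decidable (Spec_core_algorithm n s ce out) := by unfold Spec_core_algorithm; infer_instance

-- ===== CLAIM (what is proved, stated in full; the proofs are below) =====
def Claim_equal_core_algorithm : Prop := ∀ (n : Int) (s : List Int) (ce : List Int),
  Dom_core_algorithm n s ce → Pre_core_algorithm n s ce →
  Spec_core_algorithm n s ce (core_algorithm n s ce)

-- ===== LEMMAS AND PROOFS =====

-- the left-scan body of A for centre j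
def gL (s ce : List Int) (j : Int) : Int → Int → Int := fun b i =>
  if PySem.List.pyGetD s i 0 < PySem.List.pyGetD s j 0 then min b (PySem.List.pyGetD ce i 0) else b

-- the right-scan body of A for centre i
def gR (s ce : List Int) (i : Int) : Int → Int → Int := fun c k =>
  if PySem.List.pyGetD s i 0 < PySem.List.pyGetD s k 0 then min c (PySem.List.pyGetD ce k 0) else c

theorem gL_comm (s ce : List Int) (j : Int) (b x y : Int) :
    gL s ce j (gL s ce j b x) y = gL s ce j (gL s ce j b y) x := by
  unfold gL; split_ifs <;> simp [min_right_comm]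

theorem foldl_swap {f : Int → Int → Int}
    (hf : ∀ b x y, f (f b x) y = f (f b y) x) :
    ∀ (l : List Int) (b x : Int), l.foldl f (f b x) = f (l.foldl f b) x := by
  intro l
  induction l with
  | nil => intro b x; rfl
  | cons a t ih => intro b x; simp only [List.foldl_cons]; rw [hf b x a, ih]

theorem foldl_reverse_comm {f : Int → Int → Int}
    (hf : ∀ b x y, f (f b x) y = f (f b y) x) :
    ∀ (l : List Int) (b : Int), l.reverse.foldl f b = l.foldl f b := by
  intro l
  induction l with
  | nil => intro b; rfl
  | cons a t ih =>
      intro b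
      simp only [List.reverse_cons, List.foldl_append, List.foldl_cons, List.foldl_nil, ih]
      rw [← foldl_swap hf]

-- A's leftward countdown scan visits exactly the reverse of range(0, j)
theorem revRange (j : Int) :
    PySem.List.pyRange (j - 1) (-1) (-1) = (PySem.List.pyRange 0 j).reverse := by
  have h := PySem.List.pyRange_neg_one_eq_reverse (j - 1) (-1)
  simpa using h

-- indexing helpers (all indices used are nonnegative and in range)
theorem getD_set_self (xs : List Int) (a v : Int) (ha : 0 ≤ a) (ha2 : a < (xs.length : Int)) :
    PySem.List.pyGetD (PySem.List.pySetD xs a v) a 0 = v := by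
  have hlt : a.toNat < xs.length := by omega
  rw [PySem.List.pySetD_of_nonneg xs v ha, PySem.List.pyGetD_of_nonneg _ _ ha]
  simp [List.getD_eq_getElem?_getD, hlt]

theorem getD_set_other (xs : List Int) (a b v : Int) (ha : 0 ≤ a) (hb : 0 ≤ b) (hne : b ≠ a) :
    PySem.List.pyGetD (PySem.List.pySetD xs a v) b 0 = PySem.List.pyGetD xs b 0 := by
  have hne' : b.toNat ≠ a.toNat := by omega
  rw [PySem.List.pySetD_of_nonneg xs v ha, PySem.List.pyGetD_of_nonneg _ _ hb,
    PySem.List.pyGetD_of_nonneg _ _ hb]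
  simp [List.getD_eq_getElem?_getD, List.getElem?_set_ne (Ne.symm hne')]

theorem getD_replicate' (m : Nat) (v : Int) (j : Int) (hj : 0 ≤ j) (hj2 : j < (m : Int)) :
    PySem.List.pyGetD (List.replicate m v) j 0 = v := by
  rw [PySem.List.pyGetD_of_nonneg _ _ hj]
  exact List.getD_replicate _ (by omega)

-- the inner pair loop as a function of its start index
def innerRes (s ce : List Int) (n p m : Int) (LR : List Int × List Int) : List Int × List Int :=
  (PySem.List.pyRange m n 1).foldl
    (altUpd s ce (PySem.List.pyGetD s p 0) (PySem.List.pyGetD ce p 0) p) LR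

theorem innerRes_nil (s ce : List Int) (n p m : Int) (LR : List Int × List Int) (h : n ≤ m) :
    innerRes s ce n p m LR = LR := by
  unfold innerRes; rw [PySem.List.pyRange_one_eq_nil h]; rfl

theorem innerRes_cons (s ce : List Int) (n p m : Int) (LR : List Int × List Int) (h : m < n) :
    innerRes s ce n p m LR =
      innerRes s ce n p (m + 1)
        (altUpd s ce (PySem.List.pyGetD s p 0) (PySem.List.pyGetD ce p 0) p LR m) := by
  unfold innerRes; rw [PySem.List.pyRange_one_cons h]; rfl

-- characterisation of B's inner pair loop (fixed left index p, right indices in [m, n))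
theorem inner_spec (s ce : List Int) (n p : Int) (hp : 0 ≤ p) (hpn : p < n) :
    ∀ (t : Nat) (m : Int) (L R : List Int), (n - m).toNat ≤ t → p < m →
    ((L.length : Int) = n) → ((R.length : Int) = n) →
    ((innerRes s ce n p m (L, R)).1.length : Int) = n ∧
    ((innerRes s ce n p m (L, R)).2.length : Int) = n ∧
    (∀ k, 0 ≤ k → k < n →
      PySem.List.pyGetD (innerRes s ce n p m (L, R)).1 k 0 =
        if m ≤ k ∧ PySem.List.pyGetD s p 0 < PySem.List.pyGetD s k 0 then
          min (PySem.List.pyGetD L k 0) (PySem.List.pyGetD ce p 0)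
        else PySem.List.pyGetD L k 0) ∧
    (PySem.List.pyGetD (innerRes s ce n p m (L, R)).2 p 0 =
      (PySem.List.pyRange m n 1).foldl (gR s ce p) (PySem.List.pyGetD R p 0)) ∧
    (∀ i, 0 ≤ i → i ≠ p →
      PySem.List.pyGetD (innerRes s ce n p m (L, R)).2 i 0 = PySem.List.pyGetD R i 0) := by
  intro t
  induction t with
  | zero =>
      intro m L R ht hpm hL hR
      have hnm : n ≤ m := by omega
      rw [innerRes_nil s ce n p m (L, R) hnm, PySem.List.pyRange_one_eq_nil hnm]
      refine ⟨hL, hR, ?_, rfl, fun i _ _ => rfl⟩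
      intro k hk hkn
      rw [if_neg (by rintro ⟨h1, _⟩; omega)]
  | succ t ih =>
      intro m L R ht hpm hL hR
      by_cases hnm : n ≤ m
      · rw [innerRes_nil s ce n p m (L, R) hnm, PySem.List.pyRange_one_eq_nil hnm]
        refine ⟨hL, hR, ?_, rfl, fun i _ _ => rfl⟩
        intro k hk hkn
        rw [if_neg (by rintro ⟨h1, _⟩; omega)]
      · rw [not_le] at hnm
        have hm0 : 0 ≤ m := by omega
        have hmp : m ≠ p := by omega
        set sp := PySem.List.pyGetD s p 0 with hsp
        set cp := PySem.List.pyGetD ce p 0 with hcp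
        set U := altUpd s ce sp cp p (L, R) m with hU
        have hU1len : ((U.1.length : Int) = n) := by
          rw [hU]; unfold altUpd; dsimp only
          split_ifs <;> simp [PySem.List.length_pySetD, hL]
        have hU2len : ((U.2.length : Int) = n) := by
          rw [hU]; unfold altUpd; dsimp only
          split_ifs <;> simp [PySem.List.length_pySetD, hR]
        have hU1get : ∀ k, 0 ≤ k → k < n →
            PySem.List.pyGetD U.1 k 0 =
              if k = m ∧ sp < PySem.List.pyGetD s m 0 then
                min (PySem.List.pyGetD L k 0) cp
              else PySem.List.pyGetD L k 0 := by
          intro k hk hkn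
          rw [hU]; unfold altUpd
          by_cases h1 : sp < PySem.List.pyGetD s m 0
          · rw [if_pos h1]; dsimp only
            by_cases h2 : cp < PySem.List.pyGetD L m 0
            · rw [if_pos h2]
              by_cases hkm : k = m
              · subst hkm
                rw [getD_set_self L k cp hk (by omega), if_pos ⟨rfl, h1⟩]
                omega
              · rw [getD_set_other L m k cp hm0 hk hkm, if_neg (fun h => hkm h.1)]
            · rw [if_neg h2]
              by_cases hkm : k = m
              · subst hkm
                rw [if_pos ⟨rfl, h1⟩]
                omega
              · rw [if_neg (fun h => hkm h.1)]
          · rw [if_neg h1]; dsimp only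
            rw [if_neg (fun h => h1 h.2)]
        have hU2getp : PySem.List.pyGetD U.2 p 0 = gR s ce p (PySem.List.pyGetD R p 0) m := by
          rw [hU]; unfold altUpd gR
          by_cases h1 : sp < PySem.List.pyGetD s m 0
          · rw [if_pos h1]; dsimp only
            by_cases h2 : PySem.List.pyGetD ce m 0 < PySem.List.pyGetD R p 0
            · rw [if_pos h2, getD_set_self R p _ hp (by omega), if_pos h1]
              omega
            · rw [if_neg h2, if_pos h1]
              omega
          · rw [if_neg h1]; dsimp only
            rw [if_neg h1]
        have hU2geto : ∀ i, 0 ≤ i → i ≠ p →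
            PySem.List.pyGetD U.2 i 0 = PySem.List.pyGetD R i 0 := by
          intro i hi hip
          rw [hU]; unfold altUpd
          by_cases h1 : sp < PySem.List.pyGetD s m 0
          · rw [if_pos h1]; dsimp only
            by_cases h2 : PySem.List.pyGetD ce m 0 < PySem.List.pyGetD R p 0
            · rw [if_pos h2]
              exact getD_set_other R p i _ hp hi hip
            · rw [if_neg h2]
          · rw [if_neg h1]
        have hstep : innerRes s ce n p m (L, R) = innerRes s ce n p (m + 1) (U.1, U.2) := by
          rw [innerRes_cons s ce n p m (L, R) hnm]
        obtain ⟨ih1, ih2, ih3, ih4, ih5⟩ :=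
          ih (m + 1) U.1 U.2 (by omega) (by omega) hU1len hU2len
        rw [hstep]
        refine ⟨ih1, ih2, ?_, ?_, ?_⟩
        · intro k hk hkn
          rw [ih3 k hk hkn, hU1get k hk hkn]
          by_cases hkm : k = m
          · subst hkm
            split_ifs <;> omega
          · split_ifs <;> omega
        · rw [ih4, hU2getp, PySem.List.pyRange_one_cons hnm, List.foldl_cons]
        · intro i hi hip
          rw [ih5 i hi hip, hU2geto i hi hip]

-- the whole pair loop as a function of its start index
def outerRes (s ce : List Int) (n q : Int) (LR : List Int × List Int) : List Int × List Int :=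
  (PySem.List.pyRange q n 1).foldl (altStep s ce n) LR

theorem outerRes_nil (s ce : List Int) (n q : Int) (LR : List Int × List Int) (h : n ≤ q) :
    outerRes s ce n q LR = LR := by
  unfold outerRes; rw [PySem.List.pyRange_one_eq_nil h]; rfl

theorem outerRes_cons (s ce : List Int) (n q : Int) (LR : List Int × List Int) (h : q < n) :
    outerRes s ce n q LR = outerRes s ce n (q + 1) (innerRes s ce n q (q + 1) LR) := by
  unfold outerRes; rw [PySem.List.pyRange_one_cons h]; rfl

-- characterisation of B's whole pair loop (outer indices in [q, n))
theorem outer_spec (s ce : List Int) (n : Int) :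
    ∀ (t : Nat) (q : Int) (L R : List Int), (n - q).toNat ≤ t → 0 ≤ q →
    ((L.length : Int) = n) → ((R.length : Int) = n) →
    (∀ j, 0 ≤ j → j < n →
      PySem.List.pyGetD (outerRes s ce n q (L, R)).1 j 0 =
        (PySem.List.pyRange q j 1).foldl (gL s ce j) (PySem.List.pyGetD L j 0)) ∧
    (∀ i, 0 ≤ i → i < n →
      PySem.List.pyGetD (outerRes s ce n q (L, R)).2 i 0 =
        if q ≤ i then
          (PySem.List.pyRange (i + 1) n 1).foldl (gR s ce i) (PySem.List.pyGetD R i 0)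
        else PySem.List.pyGetD R i 0) := by
  intro t
  induction t with
  | zero =>
      intro q L R ht hq hL hR
      have hnq : n ≤ q := by omega
      rw [outerRes_nil s ce n q (L, R) hnq]
      constructor
      · intro j hj hjn
        rw [PySem.List.pyRange_one_eq_nil (by omega : j ≤ q), List.foldl_nil]
      · intro i hi hin
        rw [if_neg (by omega)]
  | succ t ih =>
      intro q L R ht hq hL hR
      by_cases hnq : n ≤ q
      · rw [outerRes_nil s ce n q (L, R) hnq]
        constructor
        · intro j hj hjn
          rw [PySem.List.pyRange_one_eq_nil (by omega : j ≤ q), List.foldl_nil]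
        · intro i hi hin
          rw [if_neg (by omega)]
      · rw [not_le] at hnq
        obtain ⟨hU1len, hU2len, hU1, hU2p, hU2o⟩ :=
          inner_spec s ce n q hq hnq (n - (q + 1)).toNat (q + 1) L R (by omega) (by omega) hL hR
        set U := innerRes s ce n q (q + 1) (L, R) with hUdef
        have hstep : outerRes s ce n q (L, R) = outerRes s ce n (q + 1) (U.1, U.2) := by
          rw [outerRes_cons s ce n q (L, R) hnq, hUdef]
        obtain ⟨ihL, ihR⟩ := ih (q + 1) U.1 U.2 (by omega) (by omega) hU1len hU2len
        rw [hstep]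
        constructor
        · intro j hj hjn
          rw [ihL j hj hjn, hU1 j hj hjn]
          by_cases hqj : q < j
          · rw [PySem.List.pyRange_one_cons hqj, List.foldl_cons]
            have : (if q + 1 ≤ j ∧ PySem.List.pyGetD s q 0 < PySem.List.pyGetD s j 0 then
                  min (PySem.List.pyGetD L j 0) (PySem.List.pyGetD ce q 0)
                else PySem.List.pyGetD L j 0) = gL s ce j (PySem.List.pyGetD L j 0) q := by
              unfold gL
              by_cases hP : PySem.List.pyGetD s q 0 < PySem.List.pyGetD s j 0
              · rw [if_pos ⟨by omega, hP⟩, if_pos hP]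
              · rw [if_neg (fun h => hP h.2), if_neg hP]
            rw [this]
          · rw [PySem.List.pyRange_one_eq_nil (by omega : j ≤ q),
              PySem.List.pyRange_one_eq_nil (by omega : j ≤ q + 1), List.foldl_nil, List.foldl_nil,
              if_neg (by rintro ⟨h1, _⟩; omega)]
        · intro i hi hin
          rw [ihR i hi hin]
          by_cases hik : q + 1 ≤ i
          · rw [if_pos hik, if_pos (by omega : q ≤ i), hU2o i hi (by omega)]
          · rw [if_neg hik]
            by_cases hiq : i = q
            · subst hiq
              rw [if_pos (le_refl i)]
              exact hU2p
            · rw [if_neg (by omega), hU2o i hi hiq]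

-- ===== VERDICT (by name: the statement is the Claim_ definition above) =====
theorem core_algorithm_spec : Claim_equal_core_algorithm := by
  intro n s ce hdom hpre
  unfold Spec_core_algorithm
  by_cases h3 : n < 3
  · simp only [core_algorithm, core_algorithm_alt, if_pos h3,
      PySem.List.pyRange_one_eq_nil (by omega : n - 1 ≤ 1), List.foldl_nil]
    norm_num
  · rw [not_lt] at h3
    obtain ⟨hslen, hcelen⟩ := hpre h3
    simp only [core_algorithm, core_algorithm_alt, if_neg (by omega : ¬ n < 3)]
    have hinit : ((List.replicate n.toNat ((10:Int) ^ 9)).length : Int) = n := by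
      simp [List.length_replicate]; omega
    obtain ⟨HL, HR⟩ := outer_spec s ce n (n - 0).toNat 0
      (List.replicate n.toNat ((10:Int) ^ 9)) (List.replicate n.toNat ((10:Int) ^ 9))
      (le_refl _) (le_refl 0) hinit hinit
    have hcongr := PySem.List.foldl_congr_mem (PySem.List.pyRange 1 (n - 1) 1)
      (fun best j =>
        min best (PySem.List.pyGetD ce j 0 +
          (PySem.List.pyRange (j - 1) (-1) (-1)).foldl (fun b i =>
            if PySem.List.pyGetD s i 0 < PySem.List.pyGetD s j 0 then
              min b (PySem.List.pyGetD ce i 0) else b) (10 ^ 9) +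
          (PySem.List.pyRange (j + 1) n 1).foldl (fun c k =>
            if PySem.List.pyGetD s j 0 < PySem.List.pyGetD s k 0 then
              min c (PySem.List.pyGetD ce k 0) else c) (10 ^ 9)))
      (fun best j =>
        if PySem.List.pyGetD ce j 0 +
            PySem.List.pyGetD (outerRes s ce n 0
              (List.replicate n.toNat ((10:Int) ^ 9), List.replicate n.toNat ((10:Int) ^ 9))).1 j 0 +
            PySem.List.pyGetD (outerRes s ce n 0
              (List.replicate n.toNat ((10:Int) ^ 9), List.replicate n.toNat ((10:Int) ^ 9))).2 j 0 < best then
          PySem.List.pyGetD ce j 0 +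
            PySem.List.pyGetD (outerRes s ce n 0
              (List.replicate n.toNat ((10:Int) ^ 9), List.replicate n.toNat ((10:Int) ^ 9))).1 j 0 +
            PySem.List.pyGetD (outerRes s ce n 0
              (List.replicate n.toNat ((10:Int) ^ 9), List.replicate n.toNat ((10:Int) ^ 9))).2 j 0
        else best)
      (10 ^ 9) ?_
    · rw [hcongr]; rfl
    · intro acc j hj
      beta_reduce
      rw [PySem.List.mem_pyRange_one] at hj
      have hj0 : 0 ≤ j := by omega
      have hjn : j < n := by omega
      have hb : (PySem.List.pyRange (j - 1) (-1) (-1)).foldl (fun b i =>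
            if PySem.List.pyGetD s i 0 < PySem.List.pyGetD s j 0 then
              min b (PySem.List.pyGetD ce i 0) else b) (10 ^ 9) =
          PySem.List.pyGetD (outerRes s ce n 0
            (List.replicate n.toNat ((10:Int) ^ 9), List.replicate n.toNat ((10:Int) ^ 9))).1 j 0 := by
        rw [HL j hj0 hjn, getD_replicate' n.toNat ((10:Int) ^ 9) j hj0 (by omega), revRange j,
          show (fun b i => if PySem.List.pyGetD s i 0 < PySem.List.pyGetD s j 0 then
              min b (PySem.List.pyGetD ce i 0) else b) = gL s ce j from rfl,
          foldl_reverse_comm (gL_comm s ce j)]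
      have hc : (PySem.List.pyRange (j + 1) n 1).foldl (fun c k =>
            if PySem.List.pyGetD s j 0 < PySem.List.pyGetD s k 0 then
              min c (PySem.List.pyGetD ce k 0) else c) (10 ^ 9) =
          PySem.List.pyGetD (outerRes s ce n 0
            (List.replicate n.toNat ((10:Int) ^ 9), List.replicate n.toNat ((10:Int) ^ 9))).2 j 0 := by
        rw [HR j hj0 hjn, if_pos hj0, getD_replicate' n.toNat ((10:Int) ^ 9) j hj0 (by omega)]
        rfl
      rw [hb, hc]
      split_ifs <;> omega
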